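-- pv_equiv track=rewrite | github.com/solouniverse/notes | Python/Algorithms/HashTables.py | hash_into_2digitsV2
-- ===== SOURCE A (Python) =====
-- def hash_into_2digitsV2(x):
-- 	index=1
-- 	while(x>0):
-- 		index*=x%100
-- 		x=x//100
-- 	if index >= 100:
-- 		index= hash_into_2digitsV2(index)
-- 	return index
-- ===== SOURCE B (Python) =====
-- def hash_into_2digitsV2(x):
--     # Big-endian reformulation: find the highest power of 100 not exceeding x,
--     # then multiply the base-100 chunks from the most significant end down;
--     # repeat iteratively on the product while it still has three or more digits.
--     while True:
--         if x <= 0: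
--             return 1
--         p = 1
--         while 100 * p <= x:
--             p *= 100
--         total = 1
--         while p >= 1:
--             total *= (x // p) % 100
--             p //= 100
--         if total < 100:
--             return total
--         x = total
-- ===== Notes on version B (the rewrite author's own statement) =====
-- stated objective: alternative
-- what changed: Replaces A's little-endian multiply-while-dividing loop plus tail recursion by an iterative outer loop that first finds the highest power of 100 not exceeding x and then multiplies the base-100 chunks big-endian, extracting each chunk as (x // p) % 100 while dividing the power, not x.
import Mathlib
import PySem

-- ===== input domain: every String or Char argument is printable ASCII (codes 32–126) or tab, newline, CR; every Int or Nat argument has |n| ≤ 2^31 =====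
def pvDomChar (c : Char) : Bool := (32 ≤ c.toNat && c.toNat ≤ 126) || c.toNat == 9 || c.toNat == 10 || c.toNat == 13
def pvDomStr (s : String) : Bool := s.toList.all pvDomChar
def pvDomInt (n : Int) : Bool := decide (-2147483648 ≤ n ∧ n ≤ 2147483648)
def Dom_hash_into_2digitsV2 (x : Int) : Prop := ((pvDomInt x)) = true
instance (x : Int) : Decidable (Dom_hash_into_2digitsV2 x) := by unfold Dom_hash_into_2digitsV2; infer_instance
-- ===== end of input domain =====

-- B replaces A's little-endian multiply-while-dividing loop plus tail recursion by an iterative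
-- outer loop that finds the highest power of 100 not exceeding x and multiplies the base-100
-- chunks big-endian via (x // p) % 100, dividing the power instead of x (alternative decomposition, same cost).


-- ===== PORT A =====
-- A's inner while loop: multiply the running index by the low two-digit chunk while dividing x.
-- (fuel is only a totality guard: x.toNat + 1 steps always suffice)
def pvMulLoopA (fuel : Nat) (x index : Int) : Int :=
  match fuel with
  | 0 => index
  | f + 1 =>
    if 0 < x then pvMulLoopA f (PySem.Int.floordiv x 100) (index * PySem.Int.mod x 100)
    else index

-- A's tail recursion: rehash whenever the chunk product still has more than two digits.
def pvHashA (fuel : Nat) (x : Int) : Int :=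
  match fuel with
  | 0 => 0
  | f + 1 =>
    let index := pvMulLoopA (x.toNat + 1) x 1
    if 100 ≤ index then pvHashA f index else index

def hash_into_2digitsV2 (x : Int) : Int := pvHashA (x.toNat + 1) x

-- ===== PORT B =====
-- B's power search: the largest p = 100^k with p ≤ x (fuel is only a totality guard)
def pvPowB (fuel : Nat) (x p : Int) : Int :=
  match fuel with
  | 0 => p
  | f + 1 => if 100 * p ≤ x then pvPowB f x (p * 100) else p

-- B's big-endian chunk loop: total *= (x // p) % 100 while the power is divided down
def pvProdBE (fuel : Nat) (x p total : Int) : Int :=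
  match fuel with
  | 0 => total
  | f + 1 =>
    if 1 ≤ p then
      pvProdBE f x (PySem.Int.floordiv p 100)
        (total * PySem.Int.mod (PySem.Int.floordiv x p) 100)
    else total

-- B's outer while-True loop: empty product is 1 for x ≤ 0; loop again while total ≥ 100
def pvHashB (fuel : Nat) (x : Int) : Int :=
  match fuel with
  | 0 => 0
  | f + 1 =>
    if x ≤ 0 then 1
    else
      let p := pvPowB (x.toNat + 1) x 1
      let total := pvProdBE (x.toNat + 1) x p 1
      if total < 100 then total else pvHashB f total

def hash_into_2digitsV2_alt (x : Int) : Int := pvHashB (x.toNat + 1) x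

-- ===== PRECONDITION & SPEC =====
def Spec_hash_into_2digitsV2 (x : Int) (out : Int) : Prop := out = hash_into_2digitsV2_alt x
instance (x : Int) (out : Int) : Decidable (Spec_hash_into_2digitsV2 x out) := by unfold Spec_hash_into_2digitsV2; infer_instance

-- ===== CLAIM (what is proved, stated in full; the proofs are below) =====
def Claim_equal_hash_into_2digitsV2 : Prop := ∀ (x : Int), Dom_hash_into_2digitsV2 x → Spec_hash_into_2digitsV2 x (hash_into_2digitsV2 x)

-- ===== LEMMAS AND PROOFS =====

-- A's inner loop is homogeneous in the accumulator (any fuel)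
theorem pvMulLoopA_hom : ∀ (f : Nat) (x i : Int), pvMulLoopA f x i = i * pvMulLoopA f x 1 := by
  intro f
  induction f with
  | zero => intro x i; simp [pvMulLoopA]
  | succ f ih =>
    intro x i
    simp only [pvMulLoopA]
    split_ifs with h
    · rw [ih _ (i * PySem.Int.mod x 100), ih _ (1 * PySem.Int.mod x 100)]; ring
    · ring

-- A's inner loop is the identity on nonpositive input
theorem pvMulLoopA_nonpos (f : Nat) (x i : Int) (hx : x ≤ 0) : pvMulLoopA f x i = i := by
  cases f with
  | zero => rfl
  | succ f => simp only [pvMulLoopA]; rw [if_neg (by omega)]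

-- any two sufficient fuels agree for A's inner loop
theorem pvMulLoopA_fuel : ∀ (f g : Nat) (x : Int), x.toNat < f → x.toNat < g →
    pvMulLoopA f x 1 = pvMulLoopA g x 1 := by
  intro f
  induction f with
  | zero => intro g x hf hg; omega
  | succ f ih =>
    intro g x hf hg
    obtain ⟨g', rfl⟩ : ∃ g', g = g' + 1 := ⟨g - 1, by omega⟩
    by_cases h : 0 < x
    · have hd : PySem.Int.floordiv x 100 = x / 100 :=
        PySem.Int.floordiv_eq_ediv_of_pos (by omega)
      have hq0 : 0 ≤ x / 100 := by positivity
      have hqlt : x / 100 < x := by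
        rw [Int.ediv_lt_iff_lt_mul (by omega)]; nlinarith
      simp only [pvMulLoopA]
      rw [if_pos h, if_pos h, hd, pvMulLoopA_hom f, pvMulLoopA_hom g',
        ih g' (x / 100) (by omega) (by omega)]
    · simp only [pvMulLoopA]
      rw [if_neg h, if_neg h]

-- with sufficient fuel the loop result is nonnegative, ≤ x for positive x, and < x for x ≥ 100
theorem pvMulLoopA_bound : ∀ (f : Nat) (x : Int), x.toNat < f →
    0 ≤ pvMulLoopA f x 1 ∧ (1 ≤ x → pvMulLoopA f x 1 ≤ x) ∧
    (100 ≤ x → pvMulLoopA f x 1 < x) := by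
  intro f
  induction f with
  | zero => intro x hx; omega
  | succ f ih =>
    intro x hx
    simp only [pvMulLoopA]
    split_ifs with h
    · have hm : PySem.Int.mod x 100 = x % 100 :=
        PySem.Int.mod_eq_emod_of_pos (by omega)
      have hd : PySem.Int.floordiv x 100 = x / 100 :=
        PySem.Int.floordiv_eq_ediv_of_pos (by omega)
      rw [pvMulLoopA_hom, hd, hm]
      obtain ⟨ihn, ihle, ihlt⟩ := ih (x / 100) (by omega)
      have hr0 : 0 ≤ x % 100 := by omega
      have hr99 : x % 100 < 100 := by omega
      have hq0 : 0 ≤ x / 100 := by omega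
      have hxeq : 100 * (x / 100) + x % 100 = x := by omega
      refine ⟨by positivity, ?_, ?_⟩
      · intro _
        by_cases hq1 : 1 ≤ x / 100
        · have h1 := ihle hq1
          nlinarith
        · have hq' : x / 100 = 0 := by omega
          have h2 : pvMulLoopA f (x / 100) 1 = 1 := by
            cases f <;> simp [pvMulLoopA, hq']
          rw [h2]; omega
      · intro hx100
        have hq1 : 1 ≤ x / 100 := by omega
        have h1 := ihle hq1
        nlinarith
    · refine ⟨by norm_num, ?_, ?_⟩ <;> intro h1 <;> omega

-- if the chunk product has three or more digits it is strictly below x (and nonnegative)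
theorem pvMulLoopA_lt_of_ge (x : Int) (h : 100 ≤ pvMulLoopA (x.toNat + 1) x 1) :
    pvMulLoopA (x.toNat + 1) x 1 < x := by
  obtain ⟨hn, hle, hlt⟩ := pvMulLoopA_bound (x.toNat + 1) x (by omega)
  by_cases hx : 100 ≤ x
  · exact hlt hx
  · exfalso
    by_cases hx1 : 1 ≤ x
    · have := hle hx1; omega
    · have h1 : pvMulLoopA (x.toNat + 1) x 1 = 1 := pvMulLoopA_nonpos _ x 1 (by omega)
      omega

-- B's power search returns the largest power of 100 not exceeding x
theorem pvPowB_spec : ∀ (f : Nat) (x p : Int), 0 < p → p ≤ x → x < p * 100 ^ f →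
    ∃ k : Nat, pvPowB f x p = p * 100 ^ k ∧ p * 100 ^ k ≤ x ∧ x < p * 100 ^ k * 100 := by
  intro f
  induction f with
  | zero =>
    intro x p hp hpx hx
    simp only [pow_zero, mul_one] at hx; omega
  | succ f ih =>
    intro x p hp hpx hx
    simp only [pvPowB]
    split_ifs with h
    · obtain ⟨k, hk, hk1, hk2⟩ := ih x (p * 100) (by omega) (by omega)
        (by rw [pow_succ] at hx; nlinarith)
      exact ⟨k + 1, by rw [hk, pow_succ]; ring, by rw [pow_succ]; nlinarith,
        by rw [pow_succ]; nlinarith⟩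
    · exact ⟨0, by simp only [pow_zero, mul_one], by simpa using hpx,
        by simp only [pow_zero, mul_one]; omega⟩

-- the big-endian product written as structural recursion on the exponent
def pvG : Nat → Int → Int
  | 0, x => x % 100
  | k + 1, x => (x / 100 ^ (k + 1)) % 100 * pvG k x

-- B's chunk loop with p = 100^k computes the accumulator times pvG k x
theorem pvProdBE_stop (f : Nat) (x t : Int) : pvProdBE f x 0 t = t := by
  cases f with
  | zero => rfl
  | succ f => simp only [pvProdBE]; rw [if_neg (by omega)]

theorem pvProdBE_g : ∀ (k f : Nat) (x t : Int), k < f →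
    pvProdBE f x ((100 : Int) ^ k) t = t * pvG k x := by
  intro k
  induction k with
  | zero =>
    intro f x t hf
    obtain ⟨f', rfl⟩ : ∃ f', f = f' + 1 := ⟨f - 1, by omega⟩
    simp only [pvProdBE, pow_zero]
    rw [if_pos (by omega)]
    have h1 : PySem.Int.floordiv (1 : Int) 100 = 0 := by decide
    have h2 : PySem.Int.floordiv x 1 = x := by
      rw [PySem.Int.floordiv_eq_ediv_of_pos (by omega)]; simp
    rw [h1, h2, pvProdBE_stop, PySem.Int.mod_eq_emod_of_pos (by omega)]
    rfl
  | succ k ih =>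
    intro f x t hf
    obtain ⟨f', rfl⟩ : ∃ f', f = f' + 1 := ⟨f - 1, by omega⟩
    have hpow : (0 : Int) < 100 ^ (k + 1) := by positivity
    simp only [pvProdBE]
    rw [if_pos (by omega)]
    have h1 : PySem.Int.floordiv ((100 : Int) ^ (k + 1)) 100 = 100 ^ k := by
      rw [PySem.Int.floordiv_eq_ediv_of_pos (by omega), pow_succ,
        Int.mul_ediv_cancel _ (by omega)]
    have h2 : PySem.Int.mod (PySem.Int.floordiv x (100 ^ (k + 1))) 100
        = (x / 100 ^ (k + 1)) % 100 := by
      rw [PySem.Int.floordiv_eq_ediv_of_pos hpow, PySem.Int.mod_eq_emod_of_pos (by omega)]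
    rw [h1, h2, ih f' x _ (by omega)]
    simp only [pvG]
    ring

-- peeling the lowest chunk off the big-endian product
theorem pvG_shift : ∀ (k : Nat) (x : Int), pvG (k + 1) x = x % 100 * pvG k (x / 100) := by
  intro k
  induction k with
  | zero =>
    intro x
    simp only [pvG, zero_add, pow_one]
    ring
  | succ k ih =>
    intro x
    have hdd : x / 100 / 100 ^ (k + 1) = x / 100 ^ (k + 2) := by
      rw [Int.ediv_ediv_of_nonneg (by norm_num : (0:Int) ≤ 100)]
      congr 1
      ring
    calc pvG (k + 2) x = (x / 100 ^ (k + 2)) % 100 * pvG (k + 1) x := rfl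
      _ = (x / 100 ^ (k + 2)) % 100 * (x % 100 * pvG k (x / 100)) := by rw [ih]
      _ = x % 100 * ((x / 100 / 100 ^ (k + 1)) % 100 * pvG k (x / 100)) := by rw [hdd]; ring
      _ = x % 100 * pvG (k + 1) (x / 100) := rfl

-- the big-endian product with the right exponent equals A's little-endian loop product
theorem pvG_eq_loop : ∀ (k : Nat) (x : Int), 1 ≤ x → (100 : Int) ^ k ≤ x → x < 100 ^ (k + 1) →
    pvG k x = pvMulLoopA (x.toNat + 1) x 1 := by
  intro k
  induction k with
  | zero =>
    intro x hx hlo hhi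
    have hhi' : x < 100 := by simpa using hhi
    have hmod : x % 100 = x := Int.emod_eq_of_lt (by omega) (by omega)
    have : pvMulLoopA (x.toNat + 1) x 1 = x := by
      simp only [pvMulLoopA]
      rw [if_pos (by omega), PySem.Int.floordiv_eq_ediv_of_pos (by omega : (0:Int) < 100),
        Int.ediv_eq_zero_of_lt (by omega) (by omega),
        pvMulLoopA_nonpos _ 0 _ (le_refl 0), PySem.Int.mod_eq_emod_of_pos (by omega), hmod]
      ring
    rw [this]
    simpa [pvG] using hmod
  | succ k ih =>
    intro x hx hlo hhi
    have h100 : (100 : Int) ≤ x := le_trans (by calc (100:Int) = 100^1 := (pow_one 100).symm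
      _ ≤ 100 ^ (k+1) := pow_le_pow_right₀ (by norm_num) (by omega)) hlo
    have hq1 : 1 ≤ x / 100 := by
      rw [Int.le_ediv_iff_mul_le (by omega)]; omega
    have hqlo : (100 : Int) ^ k ≤ x / 100 := by
      rw [Int.le_ediv_iff_mul_le (by omega)]
      calc (100:Int) ^ k * 100 = 100 ^ (k + 1) := by rw [pow_succ]
        _ ≤ x := hlo
    have hqhi : x / 100 < 100 ^ (k + 1) := by
      rw [Int.ediv_lt_iff_lt_mul (by omega)]
      calc x < 100 ^ (k + 2) := hhi
        _ = 100 ^ (k + 1) * 100 := by rw [pow_succ]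
    have hq0 : 0 ≤ x / 100 := by omega
    have hqltx : x / 100 < x := by
      rw [Int.ediv_lt_iff_lt_mul (by omega)]; nlinarith
    rw [pvG_shift, ih (x / 100) hq1 hqlo hqhi]
    have : pvMulLoopA (x.toNat + 1) x 1
        = x % 100 * pvMulLoopA (x.toNat) (x / 100) 1 := by
      simp only [pvMulLoopA]
      rw [if_pos (by omega), PySem.Int.floordiv_eq_ediv_of_pos (by omega : (0:Int) < 100),
        PySem.Int.mod_eq_emod_of_pos (by omega), pvMulLoopA_hom]
      ring
    rw [this, pvMulLoopA_fuel ((x / 100).toNat + 1) x.toNat (x / 100) (by omega) (by omega)]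

-- for positive x, B's power search plus big-endian loop reproduce A's inner-loop product
theorem pvTotals_eq (x : Int) (hx : 1 ≤ x) :
    pvProdBE (x.toNat + 1) x (pvPowB (x.toNat + 1) x 1) 1 = pvMulLoopA (x.toNat + 1) x 1 := by
  have hbound : x < 1 * 100 ^ (x.toNat + 1) := by
    have h1 : x.toNat < 100 ^ x.toNat := Nat.lt_pow_self (by norm_num)
    have h2 : (100 : Nat) ^ x.toNat ≤ 100 ^ (x.toNat + 1) := Nat.pow_le_pow_right (by omega) (by omega)
    have h3 : (x.toNat : Int) < ((100 : Nat) ^ (x.toNat + 1) : Nat) := by exact_mod_cast by omega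
    push_cast at h3
    omega
  obtain ⟨k, hk, hk1, hk2⟩ := pvPowB_spec (x.toNat + 1) x 1 (by omega) hx hbound
  simp only [one_mul] at hk hk1 hk2
  have hkle : k < x.toNat + 1 := by
    have h1 : (k : Int) < 100 ^ k := by exact_mod_cast (Nat.lt_pow_self (by norm_num) : k < 100 ^ k)
    omega
  rw [hk, pvProdBE_g k (x.toNat + 1) x 1 hkle, one_mul]
  exact pvG_eq_loop k x hx hk1 (by rw [pow_succ]; omega)

-- the two outer loops agree, fuel for fuel
theorem pvHash_eq : ∀ (f : Nat) (x : Int), x.toNat < f → pvHashA f x = pvHashB f x := by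
  intro f
  induction f with
  | zero => intro x hx; omega
  | succ f ih =>
    intro x hx
    simp only [pvHashA, pvHashB]
    by_cases hx0 : x ≤ 0
    · rw [if_pos hx0, pvMulLoopA_nonpos _ x 1 hx0, if_neg (by omega)]
    · rw [if_neg hx0, pvTotals_eq x (by omega)]
      by_cases h : 100 ≤ pvMulLoopA (x.toNat + 1) x 1
      · rw [if_pos h, if_neg (by omega)]
        have h1 := pvMulLoopA_lt_of_ge x h
        have h2 := (pvMulLoopA_bound (x.toNat + 1) x (by omega)).1
        exact ih _ (by omega)
      · rw [if_neg h, if_pos (by omega)]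

-- ===== VERDICT (by name: the statement is the Claim_ definition above) =====
theorem hash_into_2digitsV2_spec : Claim_equal_hash_into_2digitsV2 := by
  intro x _
  unfold Spec_hash_into_2digitsV2 hash_into_2digitsV2 hash_into_2digitsV2_alt
  exact pvHash_eq (x.toNat + 1) x (by omega)
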